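-- pv_equiv track=rewrite | github.com/martinlyra/advent-of-code-2023 | day_22.py | compute_supports
-- ===== SOURCE A (Python) =====
-- def compute_supports(blocks):
--     index = dict(enumerate(blocks))
--     supports = {i: [] for i in index}
--     supported_by = {i: [] for i in index}
--
--     stable = {}
--     for idx in index:
--         (x1, y1, z1), (x2, y2, z2) = blocks[idx]
--
--         surface = [(x, y) for y in range(y1, y2 + 1) for x in range(x1, x2 + 1)]
--
--         supporters = {}
--         while z1 > 1 and len(supporters) < 1:
--             for c in [(x, y, z1 - 1) for x, y in surface]:
--                 if c in stable:
--                     supporters[stable[c]] = True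
--             if len(supporters) < 1:
--                 z1 -= 1
--                 z2 -= 1
--
--         spaces = [(x, y, z) for z in range(z1, z2 + 1) for x, y in surface]
--
--         for s in spaces:
--             stable[s] = idx
--
--         for support in supporters:
--             supports[support].append(idx)
--             supported_by[idx].append(support)
--
--     return supports, supported_by
-- ===== SOURCE B (Python) =====
-- def compute_supports(blocks):
--     # Skyline settling: per-(x,y)-column occupancy maps (z -> block index).
--     # A block's landing level is max occupied z strictly below its bottom across
--     # its footprint; supporters are the owners of cells at that level.  The two
--     # result dicts are assembled once at the end from a flat (supporter, supported)
--     # edge list.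
--     cols = {}   # (x, y) -> {z: index of the block occupying (x, y, z)}
--     edges = []  # (supporter, supported) pairs, in discovery order
--     for idx, ((x1, y1, z1), (x2, y2, z2)) in enumerate(blocks):
--         surface = [(x, y) for y in range(y1, y2 + 1) for x in range(x1, x2 + 1)]
--         top = 0  # highest occupied level strictly below z1 (0 = resting on ground)
--         if z1 > 1:
--             for c in surface:
--                 for z in cols.get(c, {}):
--                     if top < z < z1:
--                         top = z
--             drop = z1 - top - 1
--         else:
--             drop = 0
--         if top > 0:
--             supp = []
--             for c in surface:
--                 o = cols.get(c, {}).get(top)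
--                 if o is not None and o not in supp:
--                     supp.append(o)
--             edges.extend((s, idx) for s in supp)
--         for c in surface:
--             col = cols.setdefault(c, {})
--             for z in range(z1 - drop, z2 - drop + 1):
--                 col[z] = idx
--     n = len(blocks)
--     supports = {i: [j for s, j in edges if s == i] for i in range(n)}
--     supported_by = {i: [s for s, j in edges if j == i] for i in range(n)}
--     return supports, supported_by
-- ===== Notes on version B (the rewrite author's own statement) =====
-- stated objective: faster
-- what changed: A settles each block by probing a cell-keyed dict level by level while descending; B keeps a per-(x,y)-column map of occupied levels to owners, computes the landing level directly as max occupied z below the block, and assembles the two result dicts once at the end from a flat (supporter, supported) edge list.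
import Mathlib
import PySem

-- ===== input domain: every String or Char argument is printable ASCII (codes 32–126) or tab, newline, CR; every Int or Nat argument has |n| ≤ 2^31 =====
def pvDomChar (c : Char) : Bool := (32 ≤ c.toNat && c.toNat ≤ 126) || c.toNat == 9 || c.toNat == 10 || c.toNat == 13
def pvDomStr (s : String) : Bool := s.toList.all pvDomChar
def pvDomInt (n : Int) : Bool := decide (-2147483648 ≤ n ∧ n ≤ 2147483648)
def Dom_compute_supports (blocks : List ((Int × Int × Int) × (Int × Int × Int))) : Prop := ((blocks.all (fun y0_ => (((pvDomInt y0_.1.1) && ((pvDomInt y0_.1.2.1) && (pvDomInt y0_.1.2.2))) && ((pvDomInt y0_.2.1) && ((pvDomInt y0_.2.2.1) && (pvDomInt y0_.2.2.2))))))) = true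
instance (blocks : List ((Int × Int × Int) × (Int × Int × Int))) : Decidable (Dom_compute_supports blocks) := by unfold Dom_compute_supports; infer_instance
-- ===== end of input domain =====

-- B replaces A's level-by-level downward probing of a cell-keyed dict by per-column
-- occupancy maps (landing level = max occupied z below the block) and assembles the
-- two result dicts once at the end from a flat edge list (objective: faster).

-- ===== PORT A =====
-- The internal occupancy dicts (A's 'stable', B's 'cols'), which are only looked up
-- (never iterated where order matters) and never returned, are ported as Std.HashMap
-- to match Python's O(1) dict cost; supporter dicts keep PySem.Dict insertion order.
-- surface = [(x, y) for y in range(y1, y2 + 1) for x in range(x1, x2 + 1)]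
def pvSurf (x1 y1 x2 y2 : Int) : List (Int × Int) :=
  (PySem.List.pyRange y1 (y2 + 1)).flatMap (fun y =>
    (PySem.List.pyRange x1 (x2 + 1)).map (fun x => (x, y)))

-- the 'while z1 > 1 and len(supporters) < 1' loop; each pass scans the level z1 - 1
-- and on failure decrements z1 and z2, so fuel = (z1 - 1).toNat bounds it exactly
def pvDescend (stable : Std.HashMap (Int × Int × Int) Int) (surface : List (Int × Int)) :
    Nat → Int → Int → PySem.Dict Int Bool → Int × Int × PySem.Dict Int Bool
  | 0, z1, z2, supporters => (z1, z2, supporters)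
  | fuel + 1, z1, z2, supporters =>
    if z1 > 1 ∧ supporters.size < 1 then
      let supporters := surface.foldl (fun sup c =>
        match stable[(c.1, c.2, z1 - 1)]? with
        | some v => sup.insert v true
        | none => sup) supporters
      if supporters.size < 1 then pvDescend stable surface fuel (z1 - 1) (z2 - 1) supporters
      else (z1, z2, supporters)
    else (z1, z2, supporters)

-- the body of 'for idx in index:'; state is (supports, supported_by, stable)
def pvStepA
    (st : PySem.Dict Int (List Int) × PySem.Dict Int (List Int) × Std.HashMap (Int × Int × Int) Int)
    (p : Int × ((Int × Int × Int) × (Int × Int × Int))) :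
    PySem.Dict Int (List Int) × PySem.Dict Int (List Int) × Std.HashMap (Int × Int × Int) Int :=
  let idx := p.1
  let x1 := p.2.1.1; let y1 := p.2.1.2.1; let z1 := p.2.1.2.2
  let x2 := p.2.2.1; let y2 := p.2.2.2.1; let z2 := p.2.2.2.2
  let surface := pvSurf x1 y1 x2 y2
  let r := pvDescend st.2.2 surface (z1 - 1).toNat z1 z2 PySem.Dict.empty
  -- spaces = [(x, y, z) for z in range(z1, z2 + 1) for x, y in surface]  (settled z1, z2)
  let spaces := (PySem.List.pyRange r.1 (r.2.1 + 1)).flatMap (fun z =>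
    surface.map (fun c => (c.1, c.2, z)))
  let stable := spaces.foldl (fun d s => d.insert s idx) st.2.2
  -- for support in supporters: supports[support].append(idx); supported_by[idx].append(support)
  let sp := r.2.2.keys.foldl (fun (q : PySem.Dict Int (List Int) × PySem.Dict Int (List Int)) support =>
    (q.1.modify support [] (· ++ [idx]), q.2.modify idx [] (· ++ [support]))) (st.1, st.2.1)
  (sp.1, sp.2, stable)

def compute_supports (blocks : List ((Int × Int × Int) × (Int × Int × Int))) :
    (List (Int × List Int)) × (List (Int × List Int)) :=
  -- index = dict(enumerate(blocks)); iterating it visits exactly the (idx, blocks[idx]) pairs in order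
  let index := PySem.List.enumerate blocks
  let supports0 : PySem.Dict Int (List Int) :=
    (index.map (·.1)).foldl (fun d i => d.insert i []) PySem.Dict.empty
  let supported_by0 : PySem.Dict Int (List Int) :=
    (index.map (·.1)).foldl (fun d i => d.insert i []) PySem.Dict.empty
  let res := index.foldl pvStepA (supports0, supported_by0, (∅ : Std.HashMap (Int × Int × Int) Int))
  (res.1.items, res.2.1.items)

-- ===== PORT B =====

-- the body of B's 'for idx, ... in enumerate(blocks):'; state is (cols, edges)
def pvStepB
    (st : Std.HashMap (Int × Int) (Std.HashMap Int Int) × List (Int × Int))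
    (p : Int × ((Int × Int × Int) × (Int × Int × Int))) :
    Std.HashMap (Int × Int) (Std.HashMap Int Int) × List (Int × Int) :=
  let cols := st.1
  let idx := p.1
  let x1 := p.2.1.1; let y1 := p.2.1.2.1; let z1 := p.2.1.2.2
  let x2 := p.2.2.1; let y2 := p.2.2.2.1; let z2 := p.2.2.2.2
  let surface := pvSurf x1 y1 x2 y2
  -- top = 0; if z1 > 1: for c in surface: for z in cols.get(c, {}): if top < z < z1: top = z
  let top := if z1 > 1 then
      surface.foldl (fun t c => ((cols.getD c ∅).keys).foldl
        (fun t z => if t < z ∧ z < z1 then z else t) t) 0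
    else 0
  let drop := if z1 > 1 then z1 - top - 1 else 0
  let edges := if top > 0 then
      let supp := surface.foldl (fun supp c =>
        match (cols.getD c ∅)[top]? with
        | some o => if supp.contains o then supp else supp ++ [o]
        | none => supp) ([] : List Int)
      st.2 ++ supp.map (fun s => (s, idx))
    else st.2
  -- col = cols.setdefault(c, {}); col[z] = idx for z in range(z1 - drop, z2 - drop + 1)
  let cols := surface.foldl (fun cs c =>
    cs.insert c ((PySem.List.pyRange (z1 - drop) (z2 - drop + 1)).foldl
      (fun col z => col.insert z idx) (cs.getD c ∅))) cols
  (cols, edges)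

def compute_supports_alt (blocks : List ((Int × Int × Int) × (Int × Int × Int))) :
    (List (Int × List Int)) × (List (Int × List Int)) :=
  let res := (PySem.List.enumerate blocks).foldl pvStepB ((∅ : Std.HashMap (Int × Int) (Std.HashMap Int Int)), ([] : List (Int × Int)))
  let n := (blocks.length : Int)
  ((PySem.List.pyRange 0 n).map (fun i => (i, (res.2.filter (fun e => e.1 == i)).map (·.2))),
   (PySem.List.pyRange 0 n).map (fun i => (i, (res.2.filter (fun e => e.2 == i)).map (·.1))))

-- ===== PRECONDITION & SPEC =====
def Spec_compute_supports (blocks : List ((Int × Int × Int) × (Int × Int × Int))) (out : (List (Int × List Int)) × (List (Int × List Int))) : Prop := out = compute_supports_alt blocks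
instance (blocks : List ((Int × Int × Int) × (Int × Int × Int))) (out : (List (Int × List Int)) × (List (Int × List Int))) : Decidable (Spec_compute_supports blocks out) := by unfold Spec_compute_supports; infer_instance

-- ===== CLAIM (what is proved, stated in full; the proofs are below) =====
def Claim_equal_compute_supports : Prop := ∀ (blocks : List ((Int × Int × Int) × (Int × Int × Int))), Dom_compute_supports blocks → Spec_compute_supports blocks (compute_supports blocks)

-- ===== LEMMAS AND PROOFS =====

-- the cell-keyed dict of A and the column-keyed dicts of B hold the same occupancy
def pvColInv (stable : Std.HashMap (Int × Int × Int) Int) (cols : Std.HashMap (Int × Int) (Std.HashMap Int Int)) : Prop :=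
  ∀ c : Int × Int, ∀ z : Int, stable[(c.1, c.2, z)]? = (cols.getD c ∅)[z]?

-- every stored owner is the index of an already-processed block
def pvValInv (k : Int) (stable : Std.HashMap (Int × Int × Int) Int) : Prop :=
  ∀ (s : Int × Int × Int) (v : Int), stable[s]? = some v → 0 ≤ v ∧ v < k

lemma pvMaxb (z1 : Int) (l : List Int) : ∀ t0 : Int,
    t0 ≤ l.foldl (fun t z => if t < z ∧ z < z1 then z else t) t0 ∧
    (l.foldl (fun t z => if t < z ∧ z < z1 then z else t) t0 = t0 ∨
      (l.foldl (fun t z => if t < z ∧ z < z1 then z else t) t0 ∈ l ∧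
       t0 < l.foldl (fun t z => if t < z ∧ z < z1 then z else t) t0 ∧
       l.foldl (fun t z => if t < z ∧ z < z1 then z else t) t0 < z1)) ∧
    (∀ z ∈ l, z < z1 → z ≤ l.foldl (fun t z => if t < z ∧ z < z1 then z else t) t0) := by
  induction l with
  | nil => simp
  | cons z l ih =>
    intro t0
    simp only [List.foldl_cons]
    by_cases hc : t0 < z ∧ z < z1
    · rw [if_pos hc]
      rcases ih z with ⟨h1, h2, h3⟩
      refine ⟨by omega, ?_, ?_⟩
      · rcases h2 with h2 | ⟨hm, hlt, hz⟩
        · rw [h2]; exact Or.inr ⟨List.mem_cons_self, by omega, hc.2⟩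
        · exact Or.inr ⟨List.mem_cons_of_mem _ hm, by omega, hz⟩
      · intro w hw hwz
        rcases List.mem_cons.mp hw with rfl | hw
        · omega
        · exact h3 w hw hwz
    · rw [if_neg hc]
      rcases ih t0 with ⟨h1, h2, h3⟩
      refine ⟨h1, ?_, ?_⟩
      · rcases h2 with h2 | ⟨hm, hlt, hz⟩
        · exact Or.inl h2
        · exact Or.inr ⟨List.mem_cons_of_mem _ hm, hlt, hz⟩
      · intro w hw hwz
        rcases List.mem_cons.mp hw with rfl | hw
        · omega
        · exact h3 w hw hwz

lemma pvTop (z1 : Int) (cols : Std.HashMap (Int × Int) (Std.HashMap Int Int)) (surface : List (Int × Int)) :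
    ∀ t0 : Int,
    t0 ≤ surface.foldl (fun t c => ((cols.getD c ∅).keys).foldl
        (fun t z => if t < z ∧ z < z1 then z else t) t) t0 ∧
    (surface.foldl (fun t c => ((cols.getD c ∅).keys).foldl
        (fun t z => if t < z ∧ z < z1 then z else t) t) t0 = t0 ∨
      ((∃ c ∈ surface, surface.foldl (fun t c => ((cols.getD c ∅).keys).foldl
        (fun t z => if t < z ∧ z < z1 then z else t) t) t0 ∈ (cols.getD c ∅).keys) ∧
       t0 < surface.foldl (fun t c => ((cols.getD c ∅).keys).foldl
        (fun t z => if t < z ∧ z < z1 then z else t) t) t0 ∧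
       surface.foldl (fun t c => ((cols.getD c ∅).keys).foldl
        (fun t z => if t < z ∧ z < z1 then z else t) t) t0 < z1)) ∧
    (∀ c ∈ surface, ∀ z ∈ (cols.getD c ∅).keys, z < z1 →
      z ≤ surface.foldl (fun t c => ((cols.getD c ∅).keys).foldl
        (fun t z => if t < z ∧ z < z1 then z else t) t) t0) := by
  induction surface with
  | nil => simp
  | cons c0 l ih =>
    intro t0
    simp only [List.foldl_cons]
    rcases ih (((cols.getD c0 ∅).keys).foldl
        (fun t z => if t < z ∧ z < z1 then z else t) t0) with ⟨h1, h2, h3⟩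
    rcases pvMaxb z1 ((cols.getD c0 ∅).keys) t0 with ⟨g1, g2, g3⟩
    refine ⟨by omega, ?_, ?_⟩
    · rcases h2 with h2 | ⟨⟨c, hc, hm⟩, hlt, hz⟩
      · rw [h2]
        rcases g2 with g2 | ⟨gm, glt, gz⟩
        · exact Or.inl g2
        · exact Or.inr ⟨⟨c0, List.mem_cons_self, gm⟩, by omega, by omega⟩
      · exact Or.inr ⟨⟨c, List.mem_cons_of_mem _ hc, hm⟩, by omega, hz⟩
    · intro c hc z hz hzlt
      rcases List.mem_cons.mp hc with rfl | hc
      · exact le_trans (g3 z hz hzlt) h1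
      · exact h3 c hc z hz hzlt

lemma pvSizeKeys {κ ν : Type} [BEq κ] (d : PySem.Dict κ ν) : d.size = d.keys.length := by
  simp [PySem.Dict.size, PySem.Dict.keys]

lemma pvScan_id (stable : Std.HashMap (Int × Int × Int) Int) (z : Int) :
    ∀ (l : List (Int × Int)), (∀ c ∈ l, stable[(c.1, c.2, z)]? = none) →
    ∀ (d : PySem.Dict Int Bool),
    l.foldl (fun sup c =>
      match stable[(c.1, c.2, z)]? with
      | some v => sup.insert v true
      | none => sup) d = d := by
  intro l
  induction l with
  | nil => intro _ d; rfl
  | cons c l ih =>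
    intro h d
    simp only [List.foldl_cons, h c List.mem_cons_self]
    exact ih (fun c' hc' => h c' (List.mem_cons_of_mem _ hc')) d

lemma pvScan_size_mono (stable : Std.HashMap (Int × Int × Int) Int) (z : Int) :
    ∀ (l : List (Int × Int)) (d : PySem.Dict Int Bool),
    d.size ≤ (l.foldl (fun sup c =>
      match stable[(c.1, c.2, z)]? with
      | some v => sup.insert v true
      | none => sup) d).size := by
  intro l
  induction l with
  | nil => simp
  | cons c l ih =>
    intro d
    simp only [List.foldl_cons]
    refine le_trans ?_ (ih _)
    cases hg : stable[(c.1, c.2, z)]? with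
    | none => simp
    | some v =>
      simp only [PySem.Dict.size_insert]
      split <;> omega

lemma pvScan_size (stable : Std.HashMap (Int × Int × Int) Int) (surface : List (Int × Int)) (z : Int)
    (h : ∃ c ∈ surface, (stable[(c.1, c.2, z)]?).isSome) (d : PySem.Dict Int Bool) :
    1 ≤ (surface.foldl (fun sup c =>
      match stable[(c.1, c.2, z)]? with
      | some v => sup.insert v true
      | none => sup) d).size := by
  rcases h with ⟨c, hc, hs⟩
  rcases List.append_of_mem hc with ⟨l1, l2, rfl⟩
  rw [List.foldl_append, List.foldl_cons]
  refine le_trans ?_ (pvScan_size_mono stable z l2 _)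
  rcases Option.isSome_iff_exists.mp hs with ⟨v, hv⟩
  simp only [hv]
  have h1 : ((l1.foldl (fun sup c =>
      match stable[(c.1, c.2, z)]? with
      | some v => sup.insert v true
      | none => sup) d).insert v true).contains v = true := PySem.Dict.contains_insert_self _ _ _
  have h2 := (PySem.Dict.contains_iff_mem_keys _ _).mp h1
  rw [pvSizeKeys]
  exact List.length_pos_of_mem h2

lemma pvScan_keys (stable : Std.HashMap (Int × Int × Int) Int)
    (cols : Std.HashMap (Int × Int) (Std.HashMap Int Int)) (z : Int) :
    ∀ (l : List (Int × Int)),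
    (∀ c ∈ l, stable[(c.1, c.2, z)]? = (cols.getD c ∅)[z]?) →
    ∀ (d : PySem.Dict Int Bool) (supp : List Int), d.keys = supp →
    (l.foldl (fun sup c =>
      match stable[(c.1, c.2, z)]? with
      | some v => sup.insert v true
      | none => sup) d).keys =
    l.foldl (fun supp c =>
      match (cols.getD c ∅)[z]? with
      | some o => if supp.contains o then supp else supp ++ [o]
      | none => supp) supp := by
  intro l
  induction l with
  | nil => intro _ d supp h; simpa using h
  | cons c l ih =>
    intro h d supp hds
    simp only [List.foldl_cons]
    rw [← h c List.mem_cons_self]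
    cases hg : stable[(c.1, c.2, z)]? with
    | none => exact ih (fun c' hc' => h c' (List.mem_cons_of_mem _ hc')) d supp hds
    | some v =>
      refine ih (fun c' hc' => h c' (List.mem_cons_of_mem _ hc')) _ _ ?_
      show (d.insert v true).keys = if supp.contains v then supp else supp ++ [v]
      by_cases hm : v ∈ supp
      · rw [if_pos (by rw [List.contains_iff_mem]; exact hm)]
        rw [PySem.Dict.keys_insert_of_contains _ _ ((PySem.Dict.contains_iff_mem_keys _ _).mpr (hds ▸ hm))]
        exact hds
      · rw [if_neg (by rw [List.contains_iff_mem]; exact hm)]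
        rw [PySem.Dict.keys_insert_of_not_contains _ _ (by
          rw [← Bool.not_eq_true, PySem.Dict.contains_iff_mem_keys]; rw [hds]; exact hm)]
        rw [hds]

lemma pvScan_keys_src (stable : Std.HashMap (Int × Int × Int) Int) (z : Int) :
    ∀ (l : List (Int × Int)) (d : PySem.Dict Int Bool) (v : Int),
    v ∈ (l.foldl (fun sup c =>
      match stable[(c.1, c.2, z)]? with
      | some v => sup.insert v true
      | none => sup) d).keys →
    v ∈ d.keys ∨ ∃ c ∈ l, stable[(c.1, c.2, z)]? = some v := by
  intro l
  induction l with
  | nil => intro d v h; exact Or.inl h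
  | cons c l ih =>
    intro d v h
    simp only [List.foldl_cons] at h
    cases hg : stable[(c.1, c.2, z)]? with
    | none =>
      rw [hg] at h
      rcases ih d v h with h' | ⟨c', hc', hv⟩
      · exact Or.inl h'
      · exact Or.inr ⟨c', List.mem_cons_of_mem _ hc', hv⟩
    | some w =>
      rw [hg] at h
      rcases ih _ v h with h' | ⟨c', hc', hv⟩
      · have h'' : v ∈ (d.insert w true).keys := h'
        rcases (PySem.Dict.mem_keys_insert _ _ _ _).mp h'' with rfl | h''
        · exact Or.inr ⟨c, List.mem_cons_self, hg⟩
        · exact Or.inl h''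
      · exact Or.inr ⟨c', List.mem_cons_of_mem _ hc', hv⟩

lemma pvFoldInsertGet {κ ν : Type} [BEq κ] [Hashable κ] [LawfulBEq κ] [LawfulHashable κ] (v : ν) :
    ∀ (l : List κ) (d : Std.HashMap κ ν) (k : κ),
    (l.foldl (fun d s => d.insert s v) d)[k]? = if k ∈ l then some v else d[k]? := by
  intro l
  induction l with
  | nil => simp
  | cons s l ih =>
    intro d k
    simp only [List.foldl_cons, ih, Std.HashMap.getElem?_insert, beq_iff_eq]
    by_cases h1 : k ∈ l
    · simp [h1, List.mem_cons]
    · rw [if_neg h1]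
      by_cases h2 : s = k
      · rw [if_pos (beq_iff_eq.mpr h2), if_pos (show k ∈ s :: l by simp [h2.symm])]
      · rw [if_neg (fun hb => h2 (beq_iff_eq.mp hb)), if_neg (by
          intro hm
          rcases List.mem_cons.mp hm with h | h
          · exact h2 h.symm
          · exact h1 h)]

-- the same fold over a PySem.Dict (the supports skeleton), looked up with a default
lemma pvFoldInsertGetD {κ ν : Type} [BEq κ] [LawfulBEq κ] [DecidableEq κ] (v : ν) :
    ∀ (l : List κ) (d : PySem.Dict κ ν) (k : κ),
    (l.foldl (fun d s => d.insert s v) d).get? k = if k ∈ l then some v else d.get? k := by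
  intro l
  induction l with
  | nil => simp
  | cons s l ih =>
    intro d k
    simp only [List.foldl_cons, ih, PySem.Dict.get?_insert]
    by_cases h1 : k ∈ l
    · simp [h1, List.mem_cons]
    · by_cases h2 : k = s <;> simp [h1, h2, List.mem_cons]

lemma pvMemSpaces (a b : Int) (surface : List (Int × Int)) (s : Int × Int × Int) :
    s ∈ (PySem.List.pyRange a b).flatMap (fun z => surface.map (fun c => (c.1, c.2, z))) ↔
      ((s.1, s.2.1) ∈ surface ∧ s.2.2 ∈ PySem.List.pyRange a b) := by
  simp only [List.mem_flatMap, List.mem_map]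
  constructor
  · rintro ⟨z, hz, c, hc, rfl⟩
    exact ⟨hc, hz⟩
  · rintro ⟨hc, hz⟩
    exact ⟨s.2.2, hz, (s.1, s.2.1), hc, rfl⟩

lemma pvColsGet (a b idx : Int) :
    ∀ (surface : List (Int × Int)) (cols : Std.HashMap (Int × Int) (Std.HashMap Int Int)) (c₀ : Int × Int) (z : Int),
    ((surface.foldl (fun cs c =>
        cs.insert c ((PySem.List.pyRange a b).foldl
          (fun col z => col.insert z idx) (cs.getD c ∅))) cols).getD c₀ ∅)[z]? =
      if c₀ ∈ surface ∧ z ∈ PySem.List.pyRange a b then some idx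
      else (cols.getD c₀ ∅)[z]? := by
  intro surface
  induction surface with
  | nil => simp
  | cons c l ih =>
    intro cols c₀ z
    simp only [List.foldl_cons, ih]
    by_cases h2 : z ∈ PySem.List.pyRange a b
    · by_cases hm : c₀ ∈ c :: l
      · rw [if_pos (show c₀ ∈ c :: l ∧ z ∈ PySem.List.pyRange a b from ⟨hm, h2⟩)]
        by_cases h1 : c₀ ∈ l
        · rw [if_pos (show c₀ ∈ l ∧ z ∈ PySem.List.pyRange a b from ⟨h1, h2⟩)]
        · have h3 : c₀ = c := by
            rcases List.mem_cons.mp hm with h | h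
            · exact h
            · exact absurd h h1
          rw [if_neg (show ¬(c₀ ∈ l ∧ z ∈ PySem.List.pyRange a b) from fun hx => h1 hx.1),
            Std.HashMap.getD_insert, if_pos (beq_iff_eq.mpr h3.symm), pvFoldInsertGet, if_pos h2]
      · have h1 : c₀ ∉ l := fun h => hm (List.mem_cons_of_mem _ h)
        have h3 : ¬ (c == c₀) = true := fun hb => hm (by rw [beq_iff_eq.mp hb]; exact List.mem_cons_self)
        rw [if_neg (show ¬(c₀ ∈ c :: l ∧ z ∈ PySem.List.pyRange a b) from fun hx => hm hx.1),
          if_neg (show ¬(c₀ ∈ l ∧ z ∈ PySem.List.pyRange a b) from fun hx => h1 hx.1),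
          Std.HashMap.getD_insert, if_neg h3]
    · rw [if_neg (show ¬(c₀ ∈ l ∧ z ∈ PySem.List.pyRange a b) from fun hx => h2 hx.2),
        if_neg (show ¬(c₀ ∈ c :: l ∧ z ∈ PySem.List.pyRange a b) from fun hx => h2 hx.2),
        Std.HashMap.getD_insert]
      by_cases h3 : (c == c₀) = true
      · rw [if_pos h3, pvFoldInsertGet, if_neg h2, beq_iff_eq.mp h3]
      · rw [if_neg h3]

lemma pvDescend_eq (stable : Std.HashMap (Int × Int × Int) Int) (surface : List (Int × Int)) (T : Int)
    (hT0 : 0 ≤ T)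
    (hocc : 0 < T → ∃ c ∈ surface, (stable[(c.1, c.2, T)]?).isSome) :
    ∀ (fuel : Nat) (z1 z2 : Int), fuel = (z1 - 1).toNat → T ≤ z1 - 1 →
    (∀ z, T < z → z < z1 → ∀ c ∈ surface, stable[(c.1, c.2, z)]? = none) →
    pvDescend stable surface fuel z1 z2 PySem.Dict.empty =
      if 1 < z1 then
        (T + 1, z2 - (z1 - T - 1),
          if 0 < T then
            surface.foldl (fun sup c =>
              match stable[(c.1, c.2, T)]? with
              | some v => sup.insert v true
              | none => sup) PySem.Dict.empty
          else PySem.Dict.empty)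
      else (z1, z2, PySem.Dict.empty) := by
  intro fuel
  induction fuel with
  | zero =>
    intro z1 z2 hf hT hmax
    have hz1 : z1 ≤ 1 := by omega
    rw [if_neg (by omega)]
    rfl
  | succ fuel ih =>
    intro z1 z2 hf hT hmax
    have hz1 : 1 < z1 := by omega
    rw [if_pos hz1]
    show (if z1 > 1 ∧ (PySem.Dict.empty : PySem.Dict Int Bool).size < 1 then _ else _) = _
    rw [if_pos ⟨hz1, by rw [PySem.Dict.size_empty]; omega⟩]
    by_cases hTe : T = z1 - 1
    · -- the scanned level is the top occupied one: supporters found, loop stops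
      have hTpos : 0 < T := by omega
      have hs := pvScan_size stable surface (z1 - 1) (hTe ▸ hocc hTpos) PySem.Dict.empty
      simp only []
      rw [if_neg (by omega)]
      rw [hTe, if_pos (show (0:Int) < z1 - 1 by omega)]
      simp only [Prod.mk.injEq, and_true]
      omega
    · -- level z1 - 1 is empty: the block drops one level
      have hid := pvScan_id stable (z1 - 1) surface
        (hmax (z1 - 1) (by omega) (by omega)) PySem.Dict.empty
      simp only [hid]
      rw [if_pos (by rw [PySem.Dict.size_empty]; omega)]
      rw [ih (z1 - 1) (z2 - 1) (by omega) (by omega)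
        (fun z hz1' hz2' => hmax z hz1' (by omega))]
      by_cases h2 : 1 < z1 - 1
      · rw [if_pos h2]
        simp only [Prod.mk.injEq, and_true, true_and]
        omega
      · rw [if_neg h2]
        have : T = 0 := by omega
        subst this
        simp only [Prod.mk.injEq]
        refine ⟨by omega, by omega, by rw [if_neg (by omega)]⟩

lemma pvPlaceCol (idx a b : Int) (surface : List (Int × Int))
    (stable : Std.HashMap (Int × Int × Int) Int) (cols : Std.HashMap (Int × Int) (Std.HashMap Int Int))
    (hci : pvColInv stable cols) :
    pvColInv (((PySem.List.pyRange a b).flatMap (fun z => surface.map (fun c => (c.1, c.2, z)))).foldl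
        (fun d s => d.insert s idx) stable)
      (surface.foldl (fun cs c => cs.insert c ((PySem.List.pyRange a b).foldl
        (fun col z => col.insert z idx) (cs.getD c ∅))) cols) := by
  intro c z
  rw [pvFoldInsertGet, pvColsGet]
  have hm := pvMemSpaces a b surface (c.1, c.2, z)
  simp only [Prod.mk.eta] at hm
  by_cases h : c ∈ surface ∧ z ∈ PySem.List.pyRange a b
  · rw [if_pos (hm.mpr h), if_pos h]
  · rw [if_neg (fun hx => h (hm.mp hx)), if_neg h]
    exact hci c z

lemma pvPlaceVal (k a b : Int) (surface : List (Int × Int))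
    (stable : Std.HashMap (Int × Int × Int) Int) (hvi : pvValInv k stable) (hk : 0 ≤ k) :
    pvValInv (k + 1) ((((PySem.List.pyRange a b).flatMap (fun z => surface.map (fun c => (c.1, c.2, z))))).foldl
      (fun d s => d.insert s k) stable) := by
  intro s v h
  rw [pvFoldInsertGet] at h
  split at h
  · have : v = k := by injection h; omega
    omega
  · have := hvi s v h
    omega

lemma pvStep_rel (k : Int) (b : (Int × Int × Int) × (Int × Int × Int))
    (sp sb : PySem.Dict Int (List Int)) (stable : Std.HashMap (Int × Int × Int) Int)
    (cols : Std.HashMap (Int × Int) (Std.HashMap Int Int)) (edges : List (Int × Int))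
    (hci : pvColInv stable cols) (hvi : pvValInv k stable) (hk : 0 ≤ k) :
    ∃ supp : List Int,
      (∀ s ∈ supp, 0 ≤ s ∧ s < k) ∧
      (pvStepB (cols, edges) (k, b)).2 = edges ++ supp.map (fun s => (s, k)) ∧
      (pvStepA (sp, sb, stable) (k, b)).1 =
        supp.foldl (fun d s => d.modify s [] (· ++ [k])) sp ∧
      (pvStepA (sp, sb, stable) (k, b)).2.1 =
        supp.foldl (fun d s => d.modify k [] (· ++ [s])) sb ∧
      pvColInv (pvStepA (sp, sb, stable) (k, b)).2.2 (pvStepB (cols, edges) (k, b)).1 ∧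
      pvValInv (k + 1) (pvStepA (sp, sb, stable) (k, b)).2.2 := by
  obtain ⟨⟨x1, y1, z1⟩, ⟨x2, y2, z2⟩⟩ := b
  simp only [pvStepA, pvStepB]
  by_cases hz : z1 > 1
  · rw [if_pos hz, if_pos hz]
    obtain ⟨hT0, hTdis, hTmax⟩ := pvTop z1 cols (pvSurf x1 y1 x2 y2) 0
    set surface := pvSurf x1 y1 x2 y2 with hsurf
    set T := surface.foldl (fun t c => ((cols.getD c ∅).keys).foldl
        (fun t z => if t < z ∧ z < z1 then z else t) t) 0 with hTdef
    have hoccT : 0 < T → ∃ c ∈ surface, (stable[(c.1, c.2, T)]?).isSome := by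
      intro hTpos
      rcases hTdis with h | ⟨⟨c, hc, hmem⟩, _, _⟩
      · omega
      · refine ⟨c, hc, ?_⟩
        rw [hci c T]
        rw [Option.isSome_iff_ne_none]
        intro hnone
        exact ((getElem?_eq_none_iff _ _).mp hnone) (Std.HashMap.mem_keys.mp hmem)
    have hmax : ∀ z, T < z → z < z1 → ∀ c ∈ surface, stable[(c.1, c.2, z)]? = none := by
      intro z h1 h2 c hc
      rw [hci c z]
      cases hcol : ((cols.getD c ∅)[z]?) with
      | none => rfl
      | some w =>
        exfalso
        have hz' : z ∈ (cols.getD c ∅).keys := by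
          by_contra hnm
          rw [(getElem?_eq_none_iff _ _).mpr (fun hmm => hnm (Std.HashMap.mem_keys.mpr hmm))] at hcol
          simp at hcol
        have := hTmax c hc z hz' h2
        omega
    have hTle : T ≤ z1 - 1 := by
      rcases hTdis with h | ⟨_, _, h⟩ <;> omega
    have hr := pvDescend_eq stable surface T hT0 hoccT (z1 - 1).toNat z1 z2 rfl hTle hmax
    rw [if_pos hz] at hr
    by_cases hTpos : 0 < T
    · rw [if_pos hTpos] at hr
      rw [hr]
      refine ⟨(surface.foldl (fun sup c =>
          match stable[(c.1, c.2, T)]? with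
          | some v => sup.insert v true
          | none => sup) PySem.Dict.empty).keys, ?_, ?_, ?_, ?_, ?_, ?_⟩
      · intro s hs
        rcases pvScan_keys_src stable T surface PySem.Dict.empty s hs with h | ⟨c, _, hv⟩
        · simp [PySem.Dict.keys_empty] at h
        · exact hvi _ s hv
      · rw [pvScan_keys stable cols T surface (fun c _ => hci c T)
          PySem.Dict.empty [] PySem.Dict.keys_empty]
        rw [if_pos hTpos]
      · rw [PySem.List.foldl_prod_mk
          (f := fun d s => PySem.Dict.modify d s [] (· ++ [k]))
          (g := fun d s => PySem.Dict.modify d k [] (· ++ [s]))]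
      · rw [PySem.List.foldl_prod_mk
          (f := fun d s => PySem.Dict.modify d s [] (· ++ [k]))
          (g := fun d s => PySem.Dict.modify d k [] (· ++ [s]))]
      · have h1 : z1 - (z1 - T - 1) = T + 1 := by omega
        have h2 : z2 - (z1 - T - 1) + 1 = z2 - (z1 - T - 1) + 1 := rfl
        rw [h1]
        exact pvPlaceCol k (T + 1) (z2 - (z1 - T - 1) + 1) surface stable cols hci
      · exact pvPlaceVal k (T + 1) (z2 - (z1 - T - 1) + 1) surface stable hvi hk
    · rw [if_neg hTpos] at hr
      rw [hr]
      have hT0' : T = 0 := by omega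
      refine ⟨[], by simp, ?_, ?_, ?_, ?_, ?_⟩
      · rw [if_neg (by omega)]
        simp
      · simp [PySem.Dict.keys_empty]
      · simp [PySem.Dict.keys_empty]
      · have h1 : z1 - (z1 - T - 1) = T + 1 := by omega
        rw [h1, hT0']
        have h2 : (0:Int) + 1 = z1 - (z1 - 0 - 1) := by omega
        exact pvPlaceCol k (0 + 1) (z2 - (z1 - 0 - 1) + 1) surface stable cols hci
      · rw [hT0']
        exact pvPlaceVal k (0 + 1) (z2 - (z1 - 0 - 1) + 1) surface stable hvi hk
  · rw [if_neg hz, if_neg hz]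
    set surface := pvSurf x1 y1 x2 y2 with hsurf
    have hfuel : (z1 - 1).toNat = 0 := by omega
    rw [hfuel]
    have hr : pvDescend stable surface 0 z1 z2 PySem.Dict.empty = (z1, z2, PySem.Dict.empty) := rfl
    rw [hr]
    refine ⟨[], by simp, ?_, ?_, ?_, ?_, ?_⟩
    · rw [if_neg (by omega)]
      simp
    · simp [PySem.Dict.keys_empty]
    · simp [PySem.Dict.keys_empty]
    · have h0 : z1 - 0 = z1 := by omega
      have h0' : z2 - 0 = z2 := by omega
      rw [h0, h0']
      exact pvPlaceCol k z1 (z2 + 1) surface stable cols hci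
    · exact pvPlaceVal k z1 (z2 + 1) surface stable hvi hk

lemma pvSetUpdateNoop {α : Type} [BEq α] [LawfulBEq α] (s : PySem.Set α) (xs : List α)
    (h : ∀ x ∈ xs, x ∈ s) : PySem.Set.update s xs = s := by
  rw [PySem.Set.update_eq_append_filter]
  have hnil : (PySem.Set.ofList xs).filter (fun y => !s.contains y) = [] := by
    rw [List.filter_eq_nil_iff]
    intro a ha
    have ha' : a ∈ xs := (PySem.Set.mem_ofList _ _).mp ha
    simp [h a ha']
  rw [hnil, List.append_nil]

lemma pvSuppFilter (k i : Int) (supp : List Int) :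
    ((supp.map (fun s => ((k : Int), s))).filter (fun p => p.1 == i)).map (·.2) =
    ((supp.map (fun s => (s, k))).filter (fun e => e.2 == i)).map (·.1) := by
  rw [List.filter_map, List.filter_map, List.map_map, List.map_map]
  simp [Function.comp_def]

lemma pvGrand (n : Int) : ∀ (bs : List ((Int × Int × Int) × (Int × Int × Int))) (k : Int)
    (stable : Std.HashMap (Int × Int × Int) Int)
    (cols : Std.HashMap (Int × Int) (Std.HashMap Int Int))
    (sp sb : PySem.Dict Int (List Int)) (edges : List (Int × Int)),
    0 ≤ k → k + bs.length ≤ n →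
    pvColInv stable cols → pvValInv k stable →
    (∀ e ∈ edges, e.2 < k) →
    sp.keys = PySem.List.pyRange 0 n →
    (∀ i, sp.getD i [] = (edges.filter (fun e => e.1 == i)).map (·.2)) →
    sb.keys = PySem.List.pyRange 0 n →
    (∀ i, sb.getD i [] = (edges.filter (fun e => e.2 == i)).map (·.1)) →
    ((PySem.List.enumerate bs k).foldl pvStepA (sp, sb, stable)).1.keys = PySem.List.pyRange 0 n ∧
    (∀ i, ((PySem.List.enumerate bs k).foldl pvStepA (sp, sb, stable)).1.getD i [] =
      ((((PySem.List.enumerate bs k).foldl pvStepB (cols, edges)).2.filter (fun e => e.1 == i)).map (·.2))) ∧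
    ((PySem.List.enumerate bs k).foldl pvStepA (sp, sb, stable)).2.1.keys = PySem.List.pyRange 0 n ∧
    (∀ i, ((PySem.List.enumerate bs k).foldl pvStepA (sp, sb, stable)).2.1.getD i [] =
      ((((PySem.List.enumerate bs k).foldl pvStepB (cols, edges)).2.filter (fun e => e.2 == i)).map (·.1))) := by
  intro bs
  induction bs with
  | nil =>
    intro k stable cols sp sb edges hk hkn hci hvi hed hspk hspg hsbk hsbg
    rw [PySem.List.enumerate_nil]
    exact ⟨hspk, hspg, hsbk, hsbg⟩
  | cons b bs ih =>
    intro k stable cols sp sb edges hk hkn hci hvi hed hspk hspg hsbk hsbg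
    rw [PySem.List.enumerate_cons, List.foldl_cons, List.foldl_cons]
    obtain ⟨supp, hbound, hedges, hsp', hsb', hci', hvi'⟩ :=
      pvStep_rel k b sp sb stable cols edges hci hvi hk
    have hkn' : k + 1 + bs.length ≤ n := by
      simp only [List.length_cons] at hkn; omega
    have hkltn : k < n := by
      simp only [List.length_cons] at hkn; omega
    have hed' : ∀ e ∈ (pvStepB (cols, edges) (k, b)).2, e.2 < k + 1 := by
      rw [hedges]
      intro e he
      rcases List.mem_append.mp he with he | he
      · have := hed e he; omega
      · rcases List.mem_map.mp he with ⟨s, _, rfl⟩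
        omega
    have hspk' : (pvStepA (sp, sb, stable) (k, b)).1.keys = PySem.List.pyRange 0 n := by
      rw [hsp', PySem.Dict.keys_foldl_modify supp [] (fun _ _ => (· ++ [k])) sp, hspk]
      refine pvSetUpdateNoop _ _ ?_
      intro s hs
      rw [PySem.List.mem_pyRange_one]
      have := hbound s hs
      omega
    have hsbk' : (pvStepA (sp, sb, stable) (k, b)).2.1.keys = PySem.List.pyRange 0 n := by
      rw [hsb', PySem.Dict.keys_foldl_modify_key supp (fun _ => k) [] (fun _ s => (· ++ [s])) sb, hsbk]
      refine pvSetUpdateNoop _ _ ?_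
      intro s hs
      rcases List.mem_map.mp hs with ⟨_, _, rfl⟩
      rw [PySem.List.mem_pyRange_one]
      omega
    have hspg' : ∀ i, (pvStepA (sp, sb, stable) (k, b)).1.getD i [] =
        (((pvStepB (cols, edges) (k, b)).2.filter (fun e => e.1 == i)).map (·.2)) := by
      intro i
      have hfold : (supp.map (fun s => ((s : Int), k))).foldl
          (fun d p => d.modify p.1 [] (· ++ [p.2])) sp =
          supp.foldl (fun d s => d.modify s [] (· ++ [k])) sp := by
        rw [List.foldl_map]
      rw [hsp', hedges, ← hfold,
        PySem.Dict.getD_foldl_modify_append, hspg i, List.filter_append, List.map_append]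
    have hsbg' : ∀ i, (pvStepA (sp, sb, stable) (k, b)).2.1.getD i [] =
        (((pvStepB (cols, edges) (k, b)).2.filter (fun e => e.2 == i)).map (·.1)) := by
      intro i
      have hfold : (supp.map (fun s => ((k : Int), s))).foldl
          (fun d p => d.modify p.1 [] (· ++ [p.2])) sb =
          supp.foldl (fun d s => d.modify k [] (· ++ [s])) sb := by
        rw [List.foldl_map]
      rw [hsb', hedges, ← hfold,
        PySem.Dict.getD_foldl_modify_append, hsbg i, List.filter_append, List.map_append,
        pvSuppFilter]
    exact ih (k + 1) (pvStepA (sp, sb, stable) (k, b)).2.2 (pvStepB (cols, edges) (k, b)).1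
      (pvStepA (sp, sb, stable) (k, b)).1 (pvStepA (sp, sb, stable) (k, b)).2.1
      (pvStepB (cols, edges) (k, b)).2 (by omega) hkn' hci' hvi' hed' hspk' hspg' hsbk' hsbg'

lemma pvMain (blocks : List ((Int × Int × Int) × (Int × Int × Int))) :
    compute_supports blocks = compute_supports_alt blocks := by
  simp only [compute_supports, compute_supports_alt]
  have hmap : (PySem.List.enumerate blocks).map (·.1) = PySem.List.pyRange 0 (blocks.length : Int) := by
    rw [PySem.List.map_fst_enumerate, zero_add]
  have hkeys0 : ((((PySem.List.enumerate blocks).map (·.1)).foldl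
      (fun (d : PySem.Dict Int (List Int)) i => d.insert i []) PySem.Dict.empty)).keys =
      PySem.List.pyRange 0 (blocks.length : Int) := by
    rw [PySem.Dict.keys_foldl_insert _ (fun _ _ => []) _, PySem.Dict.keys_empty,
      PySem.Set.update_nil_left, hmap,
      PySem.Set.ofList_eq_self_of_nodup _ (PySem.List.nodup_pyRange_one 0 _)]
  have hgetD0 : ∀ i, ((((PySem.List.enumerate blocks).map (·.1)).foldl
      (fun (d : PySem.Dict Int (List Int)) i => d.insert i []) PySem.Dict.empty)).getD i [] = [] := by
    intro i
    rw [PySem.Dict.getD_eq_get?_getD, pvFoldInsertGetD]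
    split <;> rfl
  obtain ⟨h1, h2, h3, h4⟩ := pvGrand (blocks.length : Int) blocks 0
    (∅ : Std.HashMap (Int × Int × Int) Int) (∅ : Std.HashMap (Int × Int) (Std.HashMap Int Int)) _ _ []
    le_rfl (by omega)
    (fun c z => by rw [Std.HashMap.getElem?_empty, Std.HashMap.getD_empty, Std.HashMap.getElem?_empty])
    (fun s v h => by rw [Std.HashMap.getElem?_empty] at h; cases h)
    (by intro e he; cases he)
    hkeys0 (fun i => by rw [hgetD0]; simp) hkeys0 (fun i => by rw [hgetD0]; simp)
  refine Prod.ext ?_ ?_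
  · show (_ : PySem.Dict Int (List Int)).items = _
    rw [PySem.Dict.items_eq_map_keys _ (h1 ▸ PySem.List.nodup_pyRange_one 0 _) [], h1]
    exact List.map_congr_left (fun i _ => by rw [h2 i])
  · show (_ : PySem.Dict Int (List Int)).items = _
    rw [PySem.Dict.items_eq_map_keys _ (h3 ▸ PySem.List.nodup_pyRange_one 0 _) [], h3]
    exact List.map_congr_left (fun i _ => by rw [h4 i])

-- ===== VERDICT (by name: the statement is the Claim_ definition above) =====
theorem compute_supports_spec : Claim_equal_compute_supports := by
  intro blocks _
  unfold Spec_compute_supports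
  exact pvMain blocks
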